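-- pv_equiv track=rewrite | github.com/dam2452/netbubbles | netbubbles/presets/dependencies.py | _compute_depths
-- ===== SOURCE A (Python) =====
-- from typing import (
--     Dict,
--     List,
--     Optional,
-- )
--
-- def _compute_depths(
--     deps: Dict[str, List[str]], root: Optional[str],
-- ) -> Dict[str, int]:
--     depths: Dict[str, int] = {}
--     if root is None:
--         return depths
--     stack = [(root, 0)]
--     visited = set()
--     while stack:
--         node, d = stack.pop(0)
--         if node in visited:
--             continue
--         visited.add(node)
--         depths[node] = d
--         for child in deps.get(node, []):
--             if child not in visited:
--                 stack.append((child, d + 1))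
--     return depths
-- ===== SOURCE B (Python) =====
-- from typing import (
--     Dict,
--     List,
--     Optional,
-- )
--
-- def _compute_depths(
--     deps: Dict[str, List[str]], root: Optional[str],
-- ) -> Dict[str, int]:
--     depths: Dict[str, int] = {}
--     if root is None:
--         return depths
--     level = [root]
--     d = 0
--     while level:
--         for node in level:
--             depths[node] = d
--         nxt: List[str] = []
--         for node in level:
--             for child in deps.get(node, []):
--                 if child not in depths and child not in nxt:
--                     nxt.append(child)
--         level = nxt
--         d += 1
--     return depths
-- ===== Notes on version B (the rewrite author's own statement) =====
-- stated objective: alternative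
-- what changed: Replaces the FIFO queue of (node,depth) pairs with its visited set and pop-time duplicate skipping by staged level lists: each round first assigns depth d to every node of the current level, then builds an eagerly deduplicated next level (membership in depths doubles as the visited check), with an integer level counter.
import Mathlib
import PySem

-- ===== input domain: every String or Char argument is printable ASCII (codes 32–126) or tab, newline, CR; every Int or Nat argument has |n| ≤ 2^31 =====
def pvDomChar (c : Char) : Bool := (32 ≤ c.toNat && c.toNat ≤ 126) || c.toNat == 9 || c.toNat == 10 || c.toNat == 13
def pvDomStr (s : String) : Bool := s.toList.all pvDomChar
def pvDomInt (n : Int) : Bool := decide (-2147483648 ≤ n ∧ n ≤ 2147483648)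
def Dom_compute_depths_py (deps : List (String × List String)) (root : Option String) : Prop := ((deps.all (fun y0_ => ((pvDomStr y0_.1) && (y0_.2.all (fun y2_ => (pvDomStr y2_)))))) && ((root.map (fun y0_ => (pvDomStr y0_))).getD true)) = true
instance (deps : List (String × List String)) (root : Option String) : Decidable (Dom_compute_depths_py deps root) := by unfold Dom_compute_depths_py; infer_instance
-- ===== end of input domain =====

-- B replaces A's FIFO queue of (node, depth) pairs, visited set and pop-time duplicate
-- skipping by staged level lists: each round assigns the whole current level, then builds
-- an eagerly deduplicated next level (the depths dict doubles as the visited check);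
-- same return value, an alternative algorithmic decomposition.

-- deps.get(node, []) : first-match association-list lookup (Python dict.get)
def pvGetDeps : List (String × List String) → String → List String
  | [], _ => []
  | p :: rest, node => if p.1 == node then p.2 else pvGetDeps rest node

-- termination measure: total weight of the not-yet-visited keys of deps
def pvW (deps : List (String × List String)) (x : String) : Nat :=
  1 + (pvGetDeps deps x).length

def pvS (deps : List (String × List String)) (visited : PySem.Set String) : Nat :=
  (((deps.map Prod.fst).filter (fun y => !(List.contains visited y))).map (pvW deps)).sum

-- generic form of the measure-drop fact, proved before the ports because their
-- termination proofs cite it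
theorem pv_sum_filter_aux (w : String → Nat) (p : String → Bool) (x : String)
    (hpx : p x = true) : ∀ (L : List String),
    ((L.filter (fun y => p y && !(y == x))).map w).sum + (if x ∈ L then w x else 0)
    ≤ ((L.filter p).map w).sum := by
  intro L
  induction L with
  | nil => simp
  | cons y L ih =>
    by_cases hpy : p y = true
    · by_cases hyx : y = x
      · have hbe : (y == x) = true := by simpa using hyx
        have hmem : x ∈ y :: L := by rw [hyx]; exact List.mem_cons_self
        have hw : w y = w x := by rw [hyx]
        simp only [List.filter_cons, hpy, hbe, Bool.not_true, Bool.and_false,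
          Bool.false_eq_true, if_false, hmem, if_pos, List.map_cons,
          List.sum_cons]
        have h0 : (0:Nat) ≤ if x ∈ L then w x else 0 := Nat.zero_le _
        omega
      · have hbe : (y == x) = false := by simpa using hyx
        simp only [List.filter_cons, hpy, hbe, Bool.not_false, Bool.and_true, if_true,
          List.map_cons, List.sum_cons, List.mem_cons]
        have hiff : (x = y ∨ x ∈ L) ↔ x ∈ L := by
          constructor
          · rintro (h | h)
            · exact absurd h.symm hyx
            · exact h
          · exact Or.inr
        rw [if_congr hiff rfl rfl]
        omega
    · have hpy' : p y = false := by simpa using hpy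
      have hyx : ¬ (x = y) := fun h => by rw [← h] at hpy'; rw [hpx] at hpy'; cases hpy'
      simp only [List.filter_cons, hpy', Bool.false_and, Bool.false_eq_true, if_false,
        List.mem_cons, hyx, false_or]
      exact ih

theorem pv_sum_filter_add (w : String → Nat) (v : List String) (x : String)
    (hx : v.contains x = false) : ∀ (L : List String),
    ((L.filter (fun y => !((v ++ [x]).contains y))).map w).sum
      + (if x ∈ L then w x else 0)
    ≤ ((L.filter (fun y => !(v.contains y))).map w).sum := by
  intro L
  have hfe : (fun y => !((v ++ [x]).contains y))
      = (fun y => (!(v.contains y)) && !(y == x)) := by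
    funext y
    by_cases h1 : y ∈ v <;> by_cases h2 : y = x <;>
      simp [List.contains_eq_mem, h1, h2]
  rw [hfe]
  exact pv_sum_filter_aux w (fun y => !(v.contains y)) x (by simpa [List.contains_eq_mem] using hx) L

theorem pv_getDeps_not_key (deps : List (String × List String)) (x : String)
    (hx : x ∉ deps.map Prod.fst) : pvGetDeps deps x = [] := by
  induction deps with
  | nil => rfl
  | cons p rest ih =>
    simp only [List.map_cons, List.mem_cons, not_or] at hx
    have h1 : (p.1 == x) = false := by
      simp only [beq_eq_false_iff_ne]; exact fun h => hx.1 h.symm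
    simp only [pvGetDeps, h1, Bool.false_eq_true, if_false]
    exact ih hx.2

-- the measure drop used by every loop below:
-- visiting a fresh node x pays for all children of x that can still be pushed
theorem pvS_visit (deps : List (String × List String)) (v : PySem.Set String) (x : String)
    (hx : PySem.Set.contains v x = false) :
    pvS deps (PySem.Set.add v x) + (pvGetDeps deps x).length ≤ pvS deps v := by
  have hx' : List.contains v x = false := hx
  have hxm : x ∉ v := by simpa [List.contains_eq_mem] using hx'
  have hadd : PySem.Set.add v x = v ++ [x] := by
    simp [PySem.Set.add, PySem.Set.contains, List.contains_eq_mem, hxm]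
  have hmain := pv_sum_filter_add (pvW deps) v x hx' (deps.map Prod.fst)
  by_cases hmem : x ∈ deps.map Prod.fst
  · simp only [hmem, if_pos] at hmain
    unfold pvS
    rw [hadd]
    have hw : pvW deps x = 1 + (pvGetDeps deps x).length := rfl
    omega
  · have h0 : pvGetDeps deps x = [] := pv_getDeps_not_key deps x hmem
    simp only [hmem, if_neg, not_false_iff] at hmain
    unfold pvS
    rw [hadd]
    simp only [h0, List.length_nil, Nat.add_zero]
    simpa using hmain

-- ===== PORT A =====
-- while stack: node,d = stack.pop(0); skip visited; record depth; push unvisited children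
def pvALoop (deps : List (String × List String)) (stack : List (String × Int))
    (visited : PySem.Set String) (depths : PySem.Dict String Int) : PySem.Dict String Int :=
  match stack with
  | [] => depths
  | (node, d) :: rest =>
    if h : PySem.Set.contains visited node then
      pvALoop deps rest visited depths
    else
      let visited' := PySem.Set.add visited node
      pvALoop deps
        (rest ++ ((pvGetDeps deps node).filter
            (fun c => !(PySem.Set.contains visited' c))).map (fun c => (c, d + 1)))
        visited' (PySem.Dict.insert depths node d)
  termination_by 2 * pvS deps visited + stack.length
  decreasing_by
  · simp only [List.length_cons]; omega
  · have hx : PySem.Set.contains visited node = false := by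
      simpa using h
    have hdrop := pvS_visit deps visited node hx
    have hk : (((pvGetDeps deps node).filter
        (fun c => !(PySem.Set.contains (PySem.Set.add visited node) c))).map
          (fun c => (c, d + 1))).length ≤ (pvGetDeps deps node).length := by
      simpa using List.length_filter_le _ _
    simp only [List.length_append, List.length_cons]
    omega

def compute_depths_py (deps : List (String × List String)) (root : Option String) :
    List (String × Int) :=
  match root with
  | none => []
  | some r => (pvALoop deps [(r, 0)] PySem.Set.empty PySem.Dict.empty).items

-- ===== PORT B =====
-- while level: assign d to all of level, then collect the deduplicated next level.
-- The Nat argument is a fuel bound used only as a totality guard: every round with a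
-- nonempty level records at least one new key, so the start fuel below is never exhausted.
def pvBRounds (deps : List (String × List String)) :
    Nat → List String → PySem.Dict String Int → Int → PySem.Dict String Int
  | 0, _, depths, _ => depths
  | fuel + 1, level, depths, d =>
    if level = [] then depths
    else
      let depths2 := level.foldl (fun dp node => PySem.Dict.insert dp node d) depths
      let nxt := level.foldl (fun acc node =>
        (pvGetDeps deps node).foldl (fun a c =>
          if PySem.Dict.contains depths2 c || a.contains c then a else a ++ [c]) acc) []
      pvBRounds deps fuel nxt depths2 (d + 1)

def compute_depths_py_alt (deps : List (String × List String)) (root : Option String) :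
    List (String × Int) :=
  match root with
  | none => []
  | some r => (pvBRounds deps (pvS deps PySem.Set.empty + 2) [r] PySem.Dict.empty 0).items

-- ===== PRECONDITION & SPEC =====
def Spec_compute_depths_py (deps : List (String × List String)) (root : Option String) (out : List (String × Int)) : Prop := out = compute_depths_py_alt deps root
instance (deps : List (String × List String)) (root : Option String) (out : List (String × Int)) : Decidable (Spec_compute_depths_py deps root out) := by unfold Spec_compute_depths_py; infer_instance

-- ===== CLAIM (what is proved, stated in full; the proofs are below) =====
def Claim_equal_compute_depths_py : Prop := ∀ (deps : List (String × List String)) (root : Option String), Dom_compute_depths_py deps root → Spec_compute_depths_py deps root (compute_depths_py deps root)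

-- ===== LEMMAS AND PROOFS =====

-- Proof-side intermediate: A's loop reorganised round by round (one fold per level, still
-- with a visited set and per-node skipping).  pvMain below proves A equal to it; the
-- bridge lemmas then prove it equal to B's staged-level rounds.
def pvBStep (deps : List (String × List String)) (d : Int)
    (st : PySem.Set String × PySem.Dict String Int × List String) (node : String) :
    PySem.Set String × PySem.Dict String Int × List String :=
  if PySem.Set.contains st.1 node then st
  else
    let visited' := PySem.Set.add st.1 node
    (visited', PySem.Dict.insert st.2.1 node d,
      st.2.2 ++ (pvGetDeps deps node).filter (fun c => !(PySem.Set.contains visited' c)))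

-- the inner fold only spends measure: cited by pvBOuter's termination proof
theorem pvBInner_le (deps : List (String × List String)) (d : Int) :
    ∀ (frontier : List String) (v : PySem.Set String) (dep : PySem.Dict String Int)
      (acc : List String),
    pvS deps (frontier.foldl (pvBStep deps d) (v, dep, acc)).1
      + ((frontier.foldl (pvBStep deps d) (v, dep, acc)).2.2).length
    ≤ pvS deps v + acc.length := by
  intro frontier
  induction frontier with
  | nil => intro v dep acc; simp
  | cons x rest ih =>
    intro v dep acc
    simp only [List.foldl_cons]
    by_cases hx : PySem.Set.contains v x = true
    · have hstep : pvBStep deps d (v, dep, acc) x = (v, dep, acc) := by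
        simp only [pvBStep, hx, if_true]
      rw [hstep]
      exact ih v dep acc
    · have hx' : PySem.Set.contains v x = false := by simpa using hx
      have hdrop := pvS_visit deps v x hx'
      have hk : ((pvGetDeps deps x).filter
          (fun c => !(PySem.Set.contains (PySem.Set.add v x) c))).length
          ≤ (pvGetDeps deps x).length := List.length_filter_le _ _
      have hstep : pvBStep deps d (v, dep, acc) x
          = (PySem.Set.add v x, PySem.Dict.insert dep x d,
             acc ++ (pvGetDeps deps x).filter
               (fun c => !(PySem.Set.contains (PySem.Set.add v x) c))) := by
        simp only [pvBStep, hx', Bool.false_eq_true, if_false]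
      rw [hstep]
      have hrec := ih (PySem.Set.add v x) (PySem.Dict.insert dep x d)
        (acc ++ (pvGetDeps deps x).filter
          (fun c => !(PySem.Set.contains (PySem.Set.add v x) c)))
      simp only [List.length_append] at hrec
      omega

def pvBOuter (deps : List (String × List String)) (frontier : List String)
    (visited : PySem.Set String) (depths : PySem.Dict String Int) (d : Int) :
    PySem.Dict String Int :=
  if h : frontier = [] then depths
  else
    let st := frontier.foldl (pvBStep deps d) (visited, depths, [])
    pvBOuter deps st.2.2 st.1 st.2.1 (d + 1)
  termination_by pvS deps visited + frontier.length
  decreasing_by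
  · have hIn := pvBInner_le deps d frontier visited depths []
    have hf : 1 ≤ frontier.length := by
      cases frontier with
      | nil => exact absurd rfl h
      | cons a l => simp
    simp only [List.length_nil, Nat.add_zero] at hIn
    simp
    omega

-- one-step unfolding lemmas for the two WF loops
theorem pvALoop_nil (deps : List (String × List String)) (v : PySem.Set String)
    (dep : PySem.Dict String Int) : pvALoop deps [] v dep = dep := by
  rw [pvALoop.eq_def]

theorem pvALoop_cons (deps : List (String × List String)) (node : String) (dv : Int)
    (rest : List (String × Int)) (v : PySem.Set String) (dep : PySem.Dict String Int) :
    pvALoop deps ((node, dv) :: rest) v dep =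
      if PySem.Set.contains v node then pvALoop deps rest v dep
      else pvALoop deps
        (rest ++ ((pvGetDeps deps node).filter
          (fun c => !(PySem.Set.contains (PySem.Set.add v node) c))).map (fun c => (c, dv + 1)))
        (PySem.Set.add v node) (PySem.Dict.insert dep node dv) := by
  rw [pvALoop.eq_def]
  dsimp only
  by_cases hc : PySem.Set.contains v node = true
  · simp only [hc, dif_pos, if_pos]
  · simp only [hc, dif_neg, if_neg, not_false_iff, Bool.false_eq_true]

theorem pvBOuter_nil (deps : List (String × List String)) (v : PySem.Set String)
    (dep : PySem.Dict String Int) (d : Int) : pvBOuter deps [] v dep d = dep := by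
  rw [pvBOuter.eq_def]
  simp

theorem pvBOuter_ne (deps : List (String × List String)) (frontier : List String)
    (v : PySem.Set String) (dep : PySem.Dict String Int) (d : Int)
    (hne : frontier ≠ []) :
    pvBOuter deps frontier v dep d =
      pvBOuter deps (frontier.foldl (pvBStep deps d) (v, dep, [])).2.2
        (frontier.foldl (pvBStep deps d) (v, dep, [])).1
        (frontier.foldl (pvBStep deps d) (v, dep, [])).2.1 (d + 1) := by
  rw [pvBOuter.eq_def]
  simp [hne]

theorem pvBStep_skip (deps : List (String × List String)) (d : Int)
    (v : PySem.Set String) (dep : PySem.Dict String Int) (acc : List String) (x : String)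
    (hx : PySem.Set.contains v x = true) :
    pvBStep deps d (v, dep, acc) x = (v, dep, acc) := by
  simp only [pvBStep, hx, if_true]

theorem pvBStep_visit (deps : List (String × List String)) (d : Int)
    (v : PySem.Set String) (dep : PySem.Dict String Int) (acc : List String) (x : String)
    (hx : PySem.Set.contains v x = false) :
    pvBStep deps d (v, dep, acc) x
      = (PySem.Set.add v x, PySem.Dict.insert dep x d,
         acc ++ (pvGetDeps deps x).filter
           (fun c => !(PySem.Set.contains (PySem.Set.add v x) c))) := by
  simp only [pvBStep, hx, Bool.false_eq_true, if_false]

-- main invariant of the first half: A's queue is always (current frontier at depth d) ++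
-- (next frontier at d+1); A's loop from such a queue equals the round-by-round form
theorem pvMain (deps : List (String × List String)) :
    ∀ (n : Nat) (frontier next : List String) (v : PySem.Set String)
      (dep : PySem.Dict String Int) (d : Int),
    2 * pvS deps v + frontier.length + 2 * next.length ≤ n →
    pvALoop deps (frontier.map (fun x => (x, d)) ++ next.map (fun x => (x, d + 1))) v dep
      = pvBOuter deps (frontier.foldl (pvBStep deps d) (v, dep, next)).2.2
          (frontier.foldl (pvBStep deps d) (v, dep, next)).1
          (frontier.foldl (pvBStep deps d) (v, dep, next)).2.1 (d + 1) := by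
  intro n
  induction n with
  | zero =>
    intro frontier next v dep d hle
    have hf : frontier = [] := by
      cases frontier with
      | nil => rfl
      | cons a l => exfalso; simp only [List.length_cons] at hle; omega
    subst hf
    have hn : next = [] := by
      cases next with
      | nil => rfl
      | cons a l => exfalso; simp only [List.length_cons, List.length_nil] at hle; omega
    subst hn
    simp only [List.map_nil, List.nil_append, List.foldl_nil, pvALoop_nil, pvBOuter_nil]
  | succ n ih =>
    intro frontier next v dep d hle
    cases frontier with
    | nil =>
      simp only [List.map_nil, List.nil_append, List.foldl_nil]
      cases next with
      | nil => simp only [List.map_nil, pvALoop_nil, pvBOuter_nil]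
      | cons y ys =>
        rw [pvBOuter_ne deps (y :: ys) v dep (d + 1) (List.cons_ne_nil y ys)]
        have hrec := ih (y :: ys) [] v dep (d + 1)
          (by simp only [List.length_nil, List.length_cons] at hle ⊢; omega)
        simp only [List.map_nil, List.append_nil] at hrec
        exact hrec
    | cons x rest =>
      simp only [List.map_cons, List.cons_append, List.foldl_cons]
      rw [pvALoop_cons]
      by_cases hx : PySem.Set.contains v x = true
      · rw [if_pos hx, pvBStep_skip deps d v dep next x hx]
        exact ih rest next v dep d (by simp only [List.length_cons] at hle; omega)
      · have hx' : PySem.Set.contains v x = false := by simpa using hx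
        rw [if_neg hx, pvBStep_visit deps d v dep next x hx']
        have hdrop := pvS_visit deps v x hx'
        have hk : ((pvGetDeps deps x).filter
            (fun c => !(PySem.Set.contains (PySem.Set.add v x) c))).length
            ≤ (pvGetDeps deps x).length := List.length_filter_le _ _
        have hrec := ih rest
          (next ++ (pvGetDeps deps x).filter
            (fun c => !(PySem.Set.contains (PySem.Set.add v x) c)))
          (PySem.Set.add v x) (PySem.Dict.insert dep x d) d
          (by
            simp only [List.length_append, List.length_cons] at hle ⊢
            omega)
        have harr : rest.map (fun y => (y, d)) ++ next.map (fun y => (y, d + 1))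
            ++ ((pvGetDeps deps x).filter
              (fun c => !(PySem.Set.contains (PySem.Set.add v x) c))).map
                (fun c => (c, d + 1))
            = rest.map (fun y => (y, d))
              ++ (next ++ (pvGetDeps deps x).filter
                (fun c => !(PySem.Set.contains (PySem.Set.add v x) c))).map
                  (fun y => (y, d + 1)) := by
          simp [List.map_append, List.append_assoc]
        rw [harr]
        exact hrec

-- ordered first-occurrence dedup against a seen list (the "clean residue" of a frontier)
def pvCleanse : List String → List String → List String
  | _, [] => []
  | v, x :: r => if v.contains x then pvCleanse v r else x :: pvCleanse (v ++ [x]) r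

-- the raw child list one round of the intermediate form appends (prefix-filtered only)
def pvNF (deps : List (String × List String)) : List String → List String → List String
  | _, [] => []
  | v, x :: r =>
    if v.contains x then pvNF deps v r
    else ((pvGetDeps deps x).filter (fun c => !((v ++ [x]).contains c))) ++ pvNF deps (v ++ [x]) r

-- characterisation of one round of the intermediate form
theorem pvRound (deps : List (String × List String)) (d : Int) :
    ∀ (frontier : List String) (v : PySem.Set String) (dep : PySem.Dict String Int)
      (acc : List String),
    frontier.foldl (pvBStep deps d) (v, dep, acc)
      = (v ++ pvCleanse v frontier,
         (pvCleanse v frontier).foldl (fun dp x => PySem.Dict.insert dp x d) dep,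
         acc ++ pvNF deps v frontier) := by
  intro frontier
  induction frontier with
  | nil => intro v dep acc; simp [pvCleanse, pvNF]
  | cons x r ih =>
    intro v dep acc
    simp only [List.foldl_cons]
    by_cases hx : PySem.Set.contains v x = true
    · have hxl : List.contains v x = true := by simpa using hx
      rw [pvBStep_skip deps d v dep acc x hx]
      simp only [pvCleanse, pvNF, hxl, if_true]
      exact ih v dep acc
    · have hx' : PySem.Set.contains v x = false := by simpa using hx
      have hxl : List.contains v x = false := by simpa using hx'
      have hxm : x ∉ v := by simpa [List.contains_eq_mem] using hxl
      have hadd : PySem.Set.add v x = v ++ [x] := by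
        simp [PySem.Set.add, PySem.Set.contains, List.contains_eq_mem, hxm]
      rw [pvBStep_visit deps d v dep acc x hx']
      rw [hadd]
      rw [ih (v ++ [x]) (PySem.Dict.insert dep x d)
        (acc ++ (pvGetDeps deps x).filter (fun c => !(PySem.Set.contains (v ++ [x]) c)))]
      simp only [pvCleanse, pvNF, hxl, Bool.false_eq_true, if_false, List.foldl_cons,
        List.append_assoc, List.cons_append, PySem.Set.contains_eq_listContains]
      rfl

theorem pvCleanse_length_le : ∀ (L v : List String), (pvCleanse v L).length ≤ L.length := by
  intro L
  induction L with
  | nil => intro v; simp [pvCleanse]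
  | cons x r ih =>
    intro v
    by_cases hx : v.contains x = true
    · simp only [pvCleanse, hx, if_true, List.length_cons]
      exact Nat.le_succ_of_le (ih v)
    · have hx' : v.contains x = false := by simpa using hx
      simp only [pvCleanse, hx', Bool.false_eq_true, if_false, List.length_cons]
      exact Nat.succ_le_succ (ih (v ++ [x]))

theorem pvCleanse_append :
    ∀ (A W B : List String),
    pvCleanse W (A ++ B) = pvCleanse W A ++ pvCleanse (W ++ pvCleanse W A) B := by
  intro A
  induction A with
  | nil => intro W B; simp [pvCleanse]
  | cons x r ih =>
    intro W B
    by_cases hx : W.contains x = true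
    · simp only [List.cons_append, pvCleanse, hx, if_true]
      exact ih W B
    · have hx' : W.contains x = false := by simpa using hx
      simp only [List.cons_append, pvCleanse, hx', Bool.false_eq_true, if_false]
      rw [ih (W ++ [x]) B]
      simp [List.append_assoc]

-- filtering away elements that are already seen does not change a cleanse
theorem pvAbsorb (p : String → Bool) :
    ∀ (L : List String) (W R : List String),
    (∀ c ∈ L, p c = false → W.contains c = true) →
    pvCleanse W (L.filter p ++ R) = pvCleanse W (L ++ R) := by
  intro L
  induction L with
  | nil => intro W R _; rfl
  | cons c r ih =>
    intro W R hcond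
    by_cases hp : p c = true
    · simp only [List.filter_cons, hp, if_true, List.cons_append, pvCleanse]
      by_cases hc : W.contains c = true
      · simp only [hc, if_true]
        exact ih W R (fun y hy hpy => hcond y (List.mem_cons_of_mem c hy) hpy)
      · have hc' : W.contains c = false := by simpa using hc
        simp only [hc', Bool.false_eq_true, if_false]
        rw [ih (W ++ [c]) R (fun y hy hpy => by
          have hyW := hcond y (List.mem_cons_of_mem c hy) hpy
          simp only [List.contains_eq_mem, decide_eq_true_eq] at hyW ⊢
          exact List.mem_append.mpr (Or.inl hyW))]
    · have hp' : p c = false := by simpa using hp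
      have hcW : W.contains c = true := hcond c List.mem_cons_self hp'
      simp only [List.filter_cons, hp', Bool.false_eq_true, if_false, List.cons_append,
        pvCleanse, hcW, if_true]
      exact ih W R (fun y hy hpy => hcond y (List.mem_cons_of_mem c hy) hpy)

theorem pvNF_nil_of_cleanse_nil (deps : List (String × List String)) :
    ∀ (frontier v : List String), pvCleanse v frontier = [] → pvNF deps v frontier = [] := by
  intro frontier
  induction frontier with
  | nil => intro v _; rfl
  | cons x r ih =>
    intro v hcl
    by_cases hx : v.contains x = true
    · simp only [pvCleanse, hx, if_true] at hcl
      simp only [pvNF, hx, if_true]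
      exact ih v hcl
    · have hx' : v.contains x = false := by simpa using hx
      simp only [pvCleanse, hx', Bool.false_eq_true, if_false] at hcl
      cases hcl

-- the prefix-filtered child chunks cleanse to the same list as the raw child chunks
theorem pvChunks (deps : List (String × List String)) :
    ∀ (frontier v W : List String),
    (∀ y, y ∈ v ∨ y ∈ pvCleanse v frontier → y ∈ W) →
    pvCleanse W (pvNF deps v frontier)
      = pvCleanse W ((pvCleanse v frontier).flatMap (pvGetDeps deps)) := by
  intro frontier
  induction frontier with
  | nil => intro v W _; rfl
  | cons x r ih =>
    intro v W hW
    by_cases hx : v.contains x = true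
    · simp only [pvNF, pvCleanse, hx, if_true] at *
      exact ih v W hW
    · have hx' : v.contains x = false := by simpa using hx
      simp only [pvNF, pvCleanse, hx', Bool.false_eq_true, if_false] at *
      have hxW : x ∈ W := hW x (Or.inr List.mem_cons_self)
      -- absorb the prefix filter on x's child chunk
      have habs := pvAbsorb (fun c => !((v ++ [x]).contains c)) (pvGetDeps deps x) W
        (pvNF deps (v ++ [x]) r)
        (by
          intro c _ hpc
          have hpc' : (!((v ++ [x]).contains c)) = false := hpc
          have hcm : c ∈ v ++ [x] := by
            have hct : (v ++ [x]).contains c = true := by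
              cases hcc : (v ++ [x]).contains c with
              | true => rfl
              | false => rw [hcc] at hpc'; simp at hpc'
            simpa [List.contains_eq_mem] using hct
          rcases List.mem_append.mp hcm with h | h
          · simpa [List.contains_eq_mem] using hW c (Or.inl h)
          · simp only [List.mem_singleton] at h
            subst h
            simpa [List.contains_eq_mem] using hxW)
      rw [habs, List.flatMap_cons]
      rw [pvCleanse_append (pvGetDeps deps x) W (pvNF deps (v ++ [x]) r)]
      rw [pvCleanse_append (pvGetDeps deps x) W ((pvCleanse (v ++ [x]) r).flatMap (pvGetDeps deps))]
      congr 1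
      exact ih (v ++ [x]) (W ++ pvCleanse W (pvGetDeps deps x))
        (by
          intro y hy
          have hyW : y ∈ W := by
            rcases hy with hy | hy
            · rcases List.mem_append.mp hy with h | h
              · exact hW y (Or.inl h)
              · simp only [List.mem_singleton] at h; subst h; exact hxW
            · exact hW y (Or.inr (List.mem_cons_of_mem x hy))
          exact List.mem_append.mpr (Or.inl hyW))

-- B's nested collection fold is a cleanse of the flattened child lists
theorem pvInnerFold (dep2 : PySem.Dict String Int) (K : List String)
    (hK : ∀ c, PySem.Dict.contains dep2 c = K.contains c) :
    ∀ (L acc : List String),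
    L.foldl (fun a c =>
        if PySem.Dict.contains dep2 c || a.contains c then a else a ++ [c]) acc
      = acc ++ pvCleanse (K ++ acc) L := by
  intro L
  induction L with
  | nil => intro acc; simp [pvCleanse]
  | cons c r ih =>
    intro acc
    simp only [List.foldl_cons, hK c]
    have hcond : (K.contains c || acc.contains c) = (K ++ acc).contains c := by
      rw [List.contains_append]
    by_cases hc : (K ++ acc).contains c = true
    · rw [hcond, hc]
      simp only [if_true, pvCleanse, hc, if_true]
      exact ih acc
    · have hc' : (K ++ acc).contains c = false := by simpa using hc
      rw [hcond, hc']
      simp only [Bool.false_eq_true, if_false, pvCleanse, hc']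
      rw [ih (acc ++ [c])]
      simp [List.append_assoc]

theorem pvOuterFold (deps : List (String × List String)) (dep2 : PySem.Dict String Int) :
    ∀ (level : List String) (acc : List String),
    level.foldl (fun acc node =>
        (pvGetDeps deps node).foldl (fun a c =>
          if PySem.Dict.contains dep2 c || a.contains c then a else a ++ [c]) acc) acc
      = (level.flatMap (pvGetDeps deps)).foldl (fun a c =>
          if PySem.Dict.contains dep2 c || a.contains c then a else a ++ [c]) acc := by
  intro level
  induction level with
  | nil => intro acc; rfl
  | cons x r ih =>
    intro acc
    simp only [List.foldl_cons, List.flatMap_cons, List.foldl_append]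
    exact ih _

theorem pvKeysFold (d : Int) :
    ∀ (frontier v : List String) (dep : PySem.Dict String Int),
    dep.keys = v →
    ((pvCleanse v frontier).foldl (fun dp x => PySem.Dict.insert dp x d) dep).keys
      = v ++ pvCleanse v frontier := by
  intro frontier
  induction frontier with
  | nil => intro v dep hk; simp [pvCleanse, hk]
  | cons x r ih =>
    intro v dep hk
    by_cases hx : v.contains x = true
    · simp only [pvCleanse, hx, if_true]
      exact ih v dep hk
    · have hx' : v.contains x = false := by simpa using hx
      have hxm : x ∉ v := by simpa [List.contains_eq_mem] using hx'
      have hnc : dep.contains x = false := by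
        cases hcc : dep.contains x with
        | false => rfl
        | true =>
          exact absurd (hk ▸ (PySem.Dict.contains_iff_mem_keys dep x).mp hcc) hxm
      simp only [pvCleanse, hx', Bool.false_eq_true, if_false, List.foldl_cons]
      rw [ih (v ++ [x]) (PySem.Dict.insert dep x d)
        (by rw [PySem.Dict.keys_insert_of_not_contains dep d hnc, hk])]
      rw [List.append_cons, List.append_assoc]
      simp

-- measure drop over a whole cleansed level
theorem pvS_cleanse (deps : List (String × List String)) :
    ∀ (frontier v : List String),
    pvS deps (v ++ pvCleanse v frontier)
      + ((pvCleanse v frontier).map (fun u => (pvGetDeps deps u).length)).sum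
    ≤ pvS deps v := by
  intro frontier
  induction frontier with
  | nil => intro v; simp [pvCleanse]
  | cons x r ih =>
    intro v
    by_cases hx : v.contains x = true
    · simp only [pvCleanse, hx, if_true]
      exact ih v
    · have hx' : v.contains x = false := by simpa using hx
      have hxm : x ∉ v := by simpa [List.contains_eq_mem] using hx'
      have hadd : PySem.Set.add v x = v ++ [x] := by
        simp [PySem.Set.add, PySem.Set.contains, List.contains_eq_mem, hxm]
      have hvisit := pvS_visit deps v x (by simpa using hx')
      rw [hadd] at hvisit
      have hih := ih (v ++ [x])
      simp only [pvCleanse, hx', Bool.false_eq_true, if_false, List.map_cons, List.sum_cons]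
      rw [List.append_cons]
      omega

-- the bridge: B's fueled staged rounds equal the intermediate round form
theorem pvBridge (deps : List (String × List String)) :
    ∀ (fuel : Nat) (frontier v : List String) (dep : PySem.Dict String Int) (d : Int),
    dep.keys = v →
    pvS deps v + (pvCleanse v frontier).length + 1 ≤ fuel →
    pvBRounds deps fuel (pvCleanse v frontier) dep d = pvBOuter deps frontier v dep d := by
  intro fuel
  induction fuel with
  | zero => intro frontier v dep d _ hb; omega
  | succ fuel ih =>
    intro frontier v dep d hk hb
    by_cases h0 : pvCleanse v frontier = []
    · rw [h0]
      have hL : pvBRounds deps (fuel + 1) [] dep d = dep := by simp [pvBRounds]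
      rw [hL]
      by_cases hf : frontier = []
      · rw [hf, pvBOuter_nil]
      · rw [pvBOuter_ne deps frontier v dep d hf, pvRound deps d frontier v dep []]
        simp only [pvNF_nil_of_cleanse_nil deps frontier v h0, List.append_nil,
          h0, List.foldl_nil, pvBOuter_nil]
    · -- nonempty level
      have hf : frontier ≠ [] := by
        intro hfe; exact h0 (by rw [hfe]; rfl)
      have hlen1 : 1 ≤ (pvCleanse v frontier).length := by
        cases hc : pvCleanse v frontier with
        | nil => exact absurd hc h0
        | cons a l => simp
      -- abbreviations
      have hkeys : ((pvCleanse v frontier).foldl (fun dp x => PySem.Dict.insert dp x d) dep).keys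
          = v ++ pvCleanse v frontier := pvKeysFold d frontier v dep hk
      have hK : ∀ c, PySem.Dict.contains
          ((pvCleanse v frontier).foldl (fun dp x => PySem.Dict.insert dp x d) dep) c
          = (v ++ pvCleanse v frontier).contains c := by
        intro c
        by_cases hc : c ∈ v ++ pvCleanse v frontier
        · have h1 := (PySem.Dict.contains_iff_mem_keys _ c).mpr (hkeys ▸ hc)
          have h2 : (v ++ pvCleanse v frontier).contains c = true := by
            simpa [List.contains_eq_mem] using hc
          rw [h1, h2]
        · have h1 : PySem.Dict.contains
              ((pvCleanse v frontier).foldl (fun dp x => PySem.Dict.insert dp x d) dep) c = false := by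
            cases hcc : PySem.Dict.contains _ c with
            | false => rfl
            | true => exact absurd (hkeys ▸ (PySem.Dict.contains_iff_mem_keys _ c).mp hcc) hc
          have h2 : (v ++ pvCleanse v frontier).contains c = false := by
            simpa [List.contains_eq_mem] using hc
          rw [h1, h2]
      -- unfold one round of B
      have hLB : pvBRounds deps (fuel + 1) (pvCleanse v frontier) dep d
          = pvBRounds deps fuel
              ((pvCleanse v frontier).foldl (fun acc node =>
                (pvGetDeps deps node).foldl (fun a c =>
                  if PySem.Dict.contains
                      ((pvCleanse v frontier).foldl (fun dp x => PySem.Dict.insert dp x d) dep) c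
                    || a.contains c then a else a ++ [c]) acc) [])
              ((pvCleanse v frontier).foldl (fun dp x => PySem.Dict.insert dp x d) dep)
              (d + 1) := by
        simp only [pvBRounds, h0, reduceIte]
      -- identify B's next level with a cleanse
      have hnxt : ((pvCleanse v frontier).foldl (fun acc node =>
            (pvGetDeps deps node).foldl (fun a c =>
              if PySem.Dict.contains
                  ((pvCleanse v frontier).foldl (fun dp x => PySem.Dict.insert dp x d) dep) c
                || a.contains c then a else a ++ [c]) acc) [])
          = pvCleanse (v ++ pvCleanse v frontier) (pvNF deps v frontier) := by
        rw [pvOuterFold, pvInnerFold _ _ hK _ []]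
        rw [List.append_nil, List.nil_append]
        exact (pvChunks deps frontier v (v ++ pvCleanse v frontier)
          (fun y hy => List.mem_append.mpr (by
            rcases hy with hy | hy
            · exact Or.inl hy
            · exact Or.inr hy))).symm
      -- unfold one round of the intermediate form
      have hRB : pvBOuter deps frontier v dep d
          = pvBOuter deps (pvNF deps v frontier) (v ++ pvCleanse v frontier)
              ((pvCleanse v frontier).foldl (fun dp x => PySem.Dict.insert dp x d) dep)
              (d + 1) := by
        rw [pvBOuter_ne deps frontier v dep d hf, pvRound deps d frontier v dep []]
        simp only [List.nil_append]
      rw [hLB, hnxt, hRB]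
      -- fuel accounting for the recursive call
      have hdrop := pvS_cleanse deps frontier v
      have hlenNF : (pvCleanse (v ++ pvCleanse v frontier) (pvNF deps v frontier)).length
          ≤ ((pvCleanse v frontier).map (fun u => (pvGetDeps deps u).length)).sum := by
        have h1 := pvChunks deps frontier v (v ++ pvCleanse v frontier)
          (fun y hy => List.mem_append.mpr (by
            rcases hy with hy | hy
            · exact Or.inl hy
            · exact Or.inr hy))
        rw [h1]
        calc (pvCleanse (v ++ pvCleanse v frontier)
                ((pvCleanse v frontier).flatMap (pvGetDeps deps))).length
            ≤ ((pvCleanse v frontier).flatMap (pvGetDeps deps)).length :=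
              pvCleanse_length_le _ _
          _ = ((pvCleanse v frontier).map (fun u => (pvGetDeps deps u).length)).sum := by
              rw [List.length_flatMap]
      exact ih (pvNF deps v frontier) (v ++ pvCleanse v frontier)
        ((pvCleanse v frontier).foldl (fun dp x => PySem.Dict.insert dp x d) dep)
        (d + 1) hkeys (by omega)

-- ===== VERDICT (by name: the statement is the Claim_ definition above) =====
theorem compute_depths_py_spec : Claim_equal_compute_depths_py := by
  intro deps root _
  unfold Spec_compute_depths_py
  cases root with
  | none => rfl
  | some r =>
    simp only [compute_depths_py, compute_depths_py_alt]
    have hA : pvALoop deps [(r, 0)] PySem.Set.empty PySem.Dict.empty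
        = pvBOuter deps [r] PySem.Set.empty PySem.Dict.empty 0 := by
      rw [pvBOuter_ne deps [r] PySem.Set.empty PySem.Dict.empty 0 (List.cons_ne_nil r [])]
      have hmain := pvMain deps (2 * pvS deps PySem.Set.empty + 1) [r] []
        PySem.Set.empty PySem.Dict.empty 0 (by simp)
      simp only [List.map_cons, List.map_nil, List.append_nil] at hmain
      exact hmain
    have hcl : pvCleanse PySem.Set.empty [r] = [r] := by
      simp [pvCleanse, PySem.Set.empty]
    have hB : pvBRounds deps (pvS deps PySem.Set.empty + 2) [r] PySem.Dict.empty 0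
        = pvBOuter deps [r] PySem.Set.empty PySem.Dict.empty 0 := by
      have := pvBridge deps (pvS deps PySem.Set.empty + 2) [r] PySem.Set.empty
        PySem.Dict.empty 0 (by simp) (by rw [hcl]; simp)
      rw [hcl] at this
      exact this
    rw [hA, hB]
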